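-- pv_equiv track=rewrite | github.com/Oyetomi/TSP | validate_serve_v3.py | analyze_by_surface
-- ===== SOURCE A (Python) =====
-- from collections import defaultdict
--
-- def analyze_by_surface(wins, losses):
--     """Analyze performance by surface"""
--     surface_stats = defaultdict(lambda: {'wins': 0, 'losses': 0})
--
--     for win in wins:
--         surf = win['surface']
--         surface_stats[surf]['wins'] += 1
--
--     for loss in losses:
--         surf = loss['surface']
--         surface_stats[surf]['losses'] += 1
--
--     return surface_stats
-- ===== SOURCE B (Python) =====
-- def analyze_by_surface(wins, losses):
--     """Analyze performance by surface"""
--     win_surfs = [w['surface'] for w in wins]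
--     loss_surfs = [l['surface'] for l in losses]
--     return {surf: {'wins': win_surfs.count(surf), 'losses': loss_surfs.count(surf)}
--             for surf in dict.fromkeys(win_surfs + loss_surfs)}
-- ===== Notes on version B (the rewrite author's own statement) =====
-- stated objective: alternative
-- what changed: B extracts the two surface lists, dedups their concatenation to fix the key order, and builds the whole result in one dict comprehension with per-surface counts, instead of A's two loops that increment a nested defaultdict entry per match; it trades A's O(n) single pass for an O(n*k) group-by-then-count.
import Mathlib
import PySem

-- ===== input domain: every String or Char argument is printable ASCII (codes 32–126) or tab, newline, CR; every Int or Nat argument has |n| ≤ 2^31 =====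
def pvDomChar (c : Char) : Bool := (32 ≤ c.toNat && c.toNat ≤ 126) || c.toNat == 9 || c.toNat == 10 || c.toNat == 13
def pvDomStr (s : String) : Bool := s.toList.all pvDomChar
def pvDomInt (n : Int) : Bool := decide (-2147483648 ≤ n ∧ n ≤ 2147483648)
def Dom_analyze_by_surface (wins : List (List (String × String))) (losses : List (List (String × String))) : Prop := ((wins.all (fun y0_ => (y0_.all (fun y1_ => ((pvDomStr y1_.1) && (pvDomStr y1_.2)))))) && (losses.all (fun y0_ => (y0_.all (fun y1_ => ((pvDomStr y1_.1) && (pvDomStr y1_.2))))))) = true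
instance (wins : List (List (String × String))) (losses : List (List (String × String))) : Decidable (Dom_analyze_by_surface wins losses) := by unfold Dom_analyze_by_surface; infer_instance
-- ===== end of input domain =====

-- B rebuilds the table by a group-by decomposition (dedup the surface lists, then count per surface)
-- instead of A's two loops incrementing a nested defaultdict entry per match; return values proved equal.

-- ===== PORT A =====
-- item['surface'] (KeyError = none, excluded by Pre_); shared helper since both sources do x['surface']
def pvSurf (item : List (String × String)) : String :=
  ((PySem.Dict.mk item).get? "surface").getD ""

-- surface_stats[surf][key] += 1 on the defaultdict: fetch (or create) the inner dict, bump key, store back in place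
def pvStep (key : String) (d : PySem.Dict String (PySem.Dict String Int)) (surf : String) :
    PySem.Dict String (PySem.Dict String Int) :=
  let inner := (d.get? surf).getD (PySem.Dict.mk [("wins", 0), ("losses", 0)])
  d.insert surf (inner.insert key (inner.getD key 0 + 1))

def analyze_by_surface (wins : List (List (String × String))) (losses : List (List (String × String))) : List (String × List (String × Int)) :=
  let d1 := wins.foldl (fun d w => pvStep "wins" d (pvSurf w)) PySem.Dict.empty
  let d2 := losses.foldl (fun d l => pvStep "losses" d (pvSurf l)) d1
  d2.items.map (fun p => (p.1, p.2.items))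

-- ===== PORT B =====
def analyze_by_surface_alt (wins : List (List (String × String))) (losses : List (List (String × String))) : List (String × List (String × Int)) :=
  let winSurfs := wins.map pvSurf
  let lossSurfs := losses.map pvSurf
  (PySem.List.dedup (winSurfs ++ lossSurfs)).map
    (fun surf => (surf, [("wins", (winSurfs.count surf : Int)), ("losses", (lossSurfs.count surf : Int))]))

-- ===== PRECONDITION & SPEC =====
-- Pre_ excludes exactly the inputs where A (and B alike) raise KeyError: a match dict without a "surface" key.
def Pre_analyze_by_surface (wins : List (List (String × String))) (losses : List (List (String × String))) : Prop :=
  (∀ w ∈ wins, "surface" ∈ w.map Prod.fst) ∧ (∀ l ∈ losses, "surface" ∈ l.map Prod.fst)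
instance (wins : List (List (String × String))) (losses : List (List (String × String))) : Decidable (Pre_analyze_by_surface wins losses) := by unfold Pre_analyze_by_surface; infer_instance

def pvWitness_analyze_by_surface : (List (List (String × String))) × (List (List (String × String))) :=
  ([[("surface", "clay")], [("surface", "hard")]], [[("surface", "clay")]])

def Spec_analyze_by_surface (wins : List (List (String × String))) (losses : List (List (String × String))) (out : List (String × List (String × Int))) : Prop := out = analyze_by_surface_alt wins losses
instance (wins : List (List (String × String))) (losses : List (List (String × String))) (out : List (String × List (String × Int))) : Decidable (Spec_analyze_by_surface wins losses out) := by unfold Spec_analyze_by_surface; infer_instance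

-- ===== CLAIM (what is proved, stated in full; the proofs are below) =====
def Claim_equal_analyze_by_surface : Prop := ∀ (wins : List (List (String × String))) (losses : List (List (String × String))), Dom_analyze_by_surface wins losses → Pre_analyze_by_surface wins losses → Spec_analyze_by_surface wins losses (analyze_by_surface wins losses)

-- ===== LEMMAS AND PROOFS =====

-- canonical shape of A's dict after processing win-surfaces ws and loss-surfaces ls
def pvCanon (ws ls : List String) : PySem.Dict String (PySem.Dict String Int) :=
  PySem.Dict.mk ((PySem.List.dedup (ws ++ ls)).map
    (fun s => (s, PySem.Dict.mk [("wins", (ws.count s : Int)), ("losses", (ls.count s : Int))])))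

lemma pv_dedup_snoc (l : List String) (x : String) :
    PySem.List.dedup (l ++ [x]) = if x ∈ l then PySem.List.dedup l else PySem.List.dedup l ++ [x] := by
  rw [PySem.List.dedup_eq_ofList, PySem.List.dedup_eq_ofList, PySem.Set.ofList_eq_foldl,
    List.foldl_append, ← PySem.Set.ofList_eq_foldl]
  by_cases h : x ∈ l <;>
    simp [PySem.Set.add, PySem.Set.contains, PySem.Set.mem_ofList, h]

lemma pv_canon_keys_nodup (ws ls : List String) : (pvCanon ws ls).keys.Nodup := by
  simp [pvCanon, PySem.Dict.keys_mk, List.map_map, Function.comp_def]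

lemma pv_canon_get_mem (ws ls : List String) (s : String) (h : s ∈ ws ++ ls) :
    (pvCanon ws ls).get? s =
      some (PySem.Dict.mk [("wins", (ws.count s : Int)), ("losses", (ls.count s : Int))]) := by
  rw [PySem.Dict.get?_eq_some_iff_mem_items _ _ _ (pv_canon_keys_nodup ws ls)]
  exact List.mem_map_of_mem ((PySem.List.mem_dedup _ _).mpr h)

lemma pv_canon_get_not_mem (ws ls : List String) (s : String) (h : s ∉ ws ++ ls) :
    (pvCanon ws ls).get? s = none := by
  rw [PySem.Dict.get?_eq_none_iff_not_mem_keys]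
  simp only [pvCanon, PySem.Dict.keys_mk, List.map_map, Function.comp_def]
  simpa [PySem.List.mem_dedup] using h

lemma pv_inner_set_losses (a b c : Int) :
    (PySem.Dict.mk [("wins", a), ("losses", b)]).insert "losses" c
      = PySem.Dict.mk [("wins", a), ("losses", c)] := by
  apply PySem.Dict.ext
  rw [PySem.Dict.items_insert_of_contains _ _ (by simp [PySem.Dict.contains_mk])]
  simp

lemma pv_inner_set_wins (a b c : Int) :
    (PySem.Dict.mk [("wins", a), ("losses", b)]).insert "wins" c
      = PySem.Dict.mk [("wins", c), ("losses", b)] := by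
  apply PySem.Dict.ext
  rw [PySem.Dict.items_insert_of_contains _ _ (by simp [PySem.Dict.contains_mk])]
  simp

lemma pv_getD_losses (a b : Int) : (PySem.Dict.mk [("wins", a), ("losses", b)]).getD "losses" 0 = b := by
  simp [PySem.Dict.getD_eq_get?_getD, PySem.Dict.get?_mk_cons]

lemma pv_getD_wins (a b : Int) : (PySem.Dict.mk [("wins", a), ("losses", b)]).getD "wins" 0 = a := by
  simp [PySem.Dict.getD_eq_get?_getD, PySem.Dict.get?_mk_cons]

lemma pv_canon_contains (ws ls : List String) (s : String) (h : s ∈ ws ++ ls) :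
    (pvCanon ws ls).contains s = true := by
  rw [PySem.Dict.contains_iff_mem_keys]
  simp [pvCanon, PySem.Dict.keys_mk, List.map_map, Function.comp_def]
  simpa [List.mem_append] using h

lemma pv_canon_not_contains (ws ls : List String) (s : String) (h : s ∉ ws ++ ls) :
    (pvCanon ws ls).contains s = false := by
  rw [← Bool.not_eq_true, PySem.Dict.contains_iff_mem_keys]
  simp only [pvCanon, PySem.Dict.keys_mk, List.map_map, Function.comp_def]
  simpa [PySem.List.mem_dedup] using h

lemma pv_stepL (ws p : List String) (s : String) :
    pvStep "losses" (pvCanon ws p) s = pvCanon ws (p ++ [s]) := by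
  by_cases h : s ∈ ws ++ p
  · unfold pvStep
    rw [pv_canon_get_mem ws p s h]
    simp only [Option.getD_some, pv_getD_losses, pv_inner_set_losses]
    apply PySem.Dict.ext
    rw [PySem.Dict.items_insert_of_contains _ _ (pv_canon_contains ws p s h)]
    simp only [pvCanon, List.map_map, Function.comp_def]
    rw [← List.append_assoc, pv_dedup_snoc, if_pos h]
    apply List.map_congr_left
    intro t ht
    by_cases hts : t = s
    · subst hts
      simp [List.count_append]
    · have hbe : (t == s) = false := by simpa using hts
      simp [hbe, List.count_append, List.count_singleton]
      intro hst; exact absurd hst.symm hts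
  · unfold pvStep
    rw [pv_canon_get_not_mem ws p s h]
    simp only [Option.getD_none, pv_getD_losses, pv_inner_set_losses]
    apply PySem.Dict.ext
    rw [PySem.Dict.items_insert_of_not_contains _ _ (pv_canon_not_contains ws p s h)]
    simp only [pvCanon, List.map_map, Function.comp_def]
    rw [← List.append_assoc, pv_dedup_snoc, if_neg h, List.map_append]
    have hsw : s ∉ ws := fun hw => h (List.mem_append.mpr (Or.inl hw))
    have hsp : s ∉ p := fun hp => h (List.mem_append.mpr (Or.inr hp))
    congr 1
    · apply List.map_congr_left
      intro t ht
      have htm : t ∈ ws ++ p := (PySem.List.mem_dedup _ _).mp ht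
      have hts : t ≠ s := fun he => h (he ▸ htm)
      simp [List.count_append, List.count_singleton]
      intro hst; exact absurd hst.symm hts
    · simp [List.count_append, List.count_singleton, List.count_eq_zero.mpr hsw, List.count_eq_zero.mpr hsp]

lemma pv_stepW (p : List String) (s : String) :
    pvStep "wins" (pvCanon p []) s = pvCanon (p ++ [s]) [] := by
  by_cases h : s ∈ p
  · have h' : s ∈ p ++ ([] : List String) := by simpa using h
    unfold pvStep
    rw [pv_canon_get_mem p [] s h']
    simp only [Option.getD_some, pv_getD_wins, pv_inner_set_wins]
    apply PySem.Dict.ext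
    rw [PySem.Dict.items_insert_of_contains _ _ (pv_canon_contains p [] s h')]
    simp only [pvCanon, List.map_map, Function.comp_def, List.append_nil]
    rw [pv_dedup_snoc, if_pos h]
    apply List.map_congr_left
    intro t ht
    by_cases hts : t = s
    · subst hts
      simp [List.count_append]
    · have hbe : (t == s) = false := by simpa using hts
      simp [hbe, List.count_append, List.count_singleton]
      intro hst; exact absurd hst.symm hts
  · have h' : s ∉ p ++ ([] : List String) := by simpa using h
    unfold pvStep
    rw [pv_canon_get_not_mem p [] s h']
    simp only [Option.getD_none, pv_getD_wins, pv_inner_set_wins]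
    apply PySem.Dict.ext
    rw [PySem.Dict.items_insert_of_not_contains _ _ (pv_canon_not_contains p [] s h')]
    simp only [pvCanon, List.map_map, Function.comp_def, List.append_nil]
    rw [pv_dedup_snoc, if_neg h, List.map_append]
    congr 1
    · apply List.map_congr_left
      intro t ht
      have htm : t ∈ p := (PySem.List.mem_dedup _ _).mp ht
      have hts : t ≠ s := fun he => h (he ▸ htm)
      simp [List.count_append, List.count_singleton]
      intro hst; exact absurd hst.symm hts
    · simp [List.count_append, List.count_singleton, List.count_eq_zero.mpr h]

lemma pv_phaseW (ws p : List String) :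
    ws.foldl (pvStep "wins") (pvCanon p []) = pvCanon (p ++ ws) [] := by
  induction ws generalizing p with
  | nil => simp
  | cons s rest ih =>
      rw [List.foldl_cons, pv_stepW, ih]
      simp

lemma pv_phaseL (ws p ls : List String) :
    ls.foldl (pvStep "losses") (pvCanon ws p) = pvCanon ws (p ++ ls) := by
  induction ls generalizing p with
  | nil => simp
  | cons s rest ih =>
      rw [List.foldl_cons, pv_stepL, ih]
      simp

-- ===== VERDICT (by name: the statement is the Claim_ definition above) =====
theorem analyze_by_surface_spec : Claim_equal_analyze_by_surface := by
  intro wins losses _ _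
  unfold Spec_analyze_by_surface
  have h1 : wins.foldl (fun d w => pvStep "wins" d (pvSurf w)) PySem.Dict.empty
      = pvCanon (wins.map pvSurf) [] := by
    rw [← List.foldl_map]
    have he : (PySem.Dict.empty : PySem.Dict String (PySem.Dict String Int)) = pvCanon [] [] := rfl
    rw [he, pv_phaseW, List.nil_append]
  have h2 : losses.foldl (fun d l => pvStep "losses" d (pvSurf l)) (pvCanon (wins.map pvSurf) [])
      = pvCanon (wins.map pvSurf) (losses.map pvSurf) := by
    rw [← List.foldl_map, pv_phaseL, List.nil_append]
  simp only [analyze_by_surface, analyze_by_surface_alt]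
  rw [h1, h2]
  simp [pvCanon, List.map_map, Function.comp_def]
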